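-- pv_equiv track=rewrite | github.com/wuxiyang1996/Video_Skills | env_wrappers/sokoban_nl_wrapper.py | summarize_elements
-- ===== SOURCE A (Python) =====
-- from typing import Any, Callable, Dict, List, Optional, Set, Tuple, Union
--
-- def summarize_elements(grid: List[List[str]]) -> str:
--     """List positions of key elements for quick reference."""
--     player_pos = []
--     boxes = []
--     targets = []
--     boxes_on_target = []
--
--     for r, row in enumerate(grid):
--         for c, ch in enumerate(row):
--             if ch == "@":
--                 player_pos.append((r, c))
--             elif ch == "+":
--                 player_pos.append((r, c))
--                 targets.append((r, c))
--             elif ch == "$":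
--                 boxes.append((r, c))
--             elif ch == "?":
--                 targets.append((r, c))
--             elif ch == "*":
--                 boxes_on_target.append((r, c))
--
--     parts = []
--     if player_pos:
--         parts.append(f"Player: {player_pos[0]}")
--     if boxes:
--         parts.append(f"Boxes on floor: {boxes}")
--     if targets:
--         parts.append(f"Empty targets: {targets}")
--     if boxes_on_target:
--         parts.append(f"Boxes on target (solved): {boxes_on_target}")
--     total_boxes = len(boxes) + len(boxes_on_target)
--     total_targets = len(targets) + len(boxes_on_target)
--     parts.append(f"Progress: {len(boxes_on_target)}/{total_targets} targets filled")
--     return "\n".join(parts)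
-- ===== SOURCE B (Python) =====
-- def summarize_elements(grid):
--     """List positions of key elements for quick reference."""
--     player_pos = [(r, c) for r, row in enumerate(grid)
--                   for c, ch in enumerate(row) if ch in ("@", "+")]
--     boxes = [(r, c) for r, row in enumerate(grid)
--              for c, ch in enumerate(row) if ch == "$"]
--     targets = [(r, c) for r, row in enumerate(grid)
--                for c, ch in enumerate(row) if ch in ("+", "?")]
--     boxes_on_target = [(r, c) for r, row in enumerate(grid)
--                        for c, ch in enumerate(row) if ch == "*"]
--
--     parts = []
--     if player_pos:
--         parts.append(f"Player: {player_pos[0]}")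
--     if boxes:
--         parts.append(f"Boxes on floor: {boxes}")
--     if targets:
--         parts.append(f"Empty targets: {targets}")
--     if boxes_on_target:
--         parts.append(f"Boxes on target (solved): {boxes_on_target}")
--     total_targets = len(targets) + len(boxes_on_target)
--     parts.append(f"Progress: {len(boxes_on_target)}/{total_targets} targets filled")
--     return "\n".join(parts)
-- ===== Notes on version B (the rewrite author's own statement) =====
-- stated objective: idiomatic
-- what changed: Replaces the single dispatch loop with four independent row-major filtering comprehensions, one per element class, keeping the formatting tail identical.
import Mathlib
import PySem

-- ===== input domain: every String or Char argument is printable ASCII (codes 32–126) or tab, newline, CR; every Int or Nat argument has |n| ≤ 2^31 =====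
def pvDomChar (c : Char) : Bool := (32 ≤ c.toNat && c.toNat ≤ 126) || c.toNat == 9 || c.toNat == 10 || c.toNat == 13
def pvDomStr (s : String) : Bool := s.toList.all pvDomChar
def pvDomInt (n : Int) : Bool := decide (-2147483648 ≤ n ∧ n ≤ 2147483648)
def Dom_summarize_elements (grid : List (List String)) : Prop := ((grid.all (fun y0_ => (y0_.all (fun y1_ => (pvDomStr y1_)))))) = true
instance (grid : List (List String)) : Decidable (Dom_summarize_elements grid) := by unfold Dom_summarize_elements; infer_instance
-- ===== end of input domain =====

-- B changes only the collection phase: four independent row-major filtering passes (one per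
-- element class) instead of A's single dispatch loop; the formatting tail is identical (idiomatic).

-- shared formatting helpers: Python's repr of an int pair / list of pairs, used by both tails
def fmtPair (p : Int × Int) : String := "(" ++ PySem.Int.toStr p.1 ++ ", " ++ PySem.Int.toStr p.2 ++ ")"
def fmtList (l : List (Int × Int)) : String := "[" ++ PySem.Str.join ", " (l.map fmtPair) ++ "]"

-- the identical formatting tail of both Pythons (parts list, optional lines, Progress line)
def formatSummary (player_pos boxes targets boxes_on_target : List (Int × Int)) : String :=
  let parts : List String := []
  let parts := match player_pos with
    | [] => parts
    | p :: _ => parts ++ ["Player: " ++ fmtPair p]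
  let parts := if boxes = [] then parts else parts ++ ["Boxes on floor: " ++ fmtList boxes]
  let parts := if targets = [] then parts else parts ++ ["Empty targets: " ++ fmtList targets]
  let parts := if boxes_on_target = [] then parts
    else parts ++ ["Boxes on target (solved): " ++ fmtList boxes_on_target]
  let total_targets : Int := (targets.length : Int) + (boxes_on_target.length : Int)
  let parts := parts ++ ["Progress: " ++ PySem.Int.toStr (boxes_on_target.length : Int) ++ "/"
    ++ PySem.Int.toStr total_targets ++ " targets filled"]
  PySem.Str.join "\n" parts

-- ===== PORT A =====
-- the state: (player_pos, boxes, targets, boxes_on_target)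
abbrev StA := List (Int × Int) × List (Int × Int) × List (Int × Int) × List (Int × Int)

-- A's inner dispatch: one cell (c, ch) at row r, appended to the matching list
def stepA (r : Int) (st : StA) (cch : Int × String) : StA :=
  let (c, ch) := cch
  let (pl, bx, tg, bt) := st
  if ch = "@" then (pl ++ [(r, c)], bx, tg, bt)
  else if ch = "+" then (pl ++ [(r, c)], bx, tg ++ [(r, c)], bt)
  else if ch = "$" then (pl, bx ++ [(r, c)], tg, bt)
  else if ch = "?" then (pl, bx, tg ++ [(r, c)], bt)
  else if ch = "*" then (pl, bx, tg, bt ++ [(r, c)])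
  else (pl, bx, tg, bt)

def rowA (st : StA) (rrow : Int × List String) : StA :=
  (PySem.List.enumerate rrow.2).foldl (stepA rrow.1) st

def summarize_elements (grid : List (List String)) : String :=
  let st := (PySem.List.enumerate grid).foldl rowA ([], [], [], [])
  formatSummary st.1 st.2.1 st.2.2.1 st.2.2.2

-- ===== PORT B =====
-- one filtering comprehension: row-major positions of cells whose content satisfies pred
def collectB (pred : String → Bool) (grid : List (List String)) : List (Int × Int) :=
  (PySem.List.enumerate grid).flatMap (fun rrow =>
    (PySem.List.enumerate rrow.2).filterMap (fun cch =>
      if pred cch.2 then some (rrow.1, cch.1) else none))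

def summarize_elements_alt (grid : List (List String)) : String :=
  formatSummary
    (collectB (fun ch => ch == "@" || ch == "+") grid)
    (collectB (fun ch => ch == "$") grid)
    (collectB (fun ch => ch == "+" || ch == "?") grid)
    (collectB (fun ch => ch == "*") grid)

-- ===== PRECONDITION & SPEC =====
def Spec_summarize_elements (grid : List (List String)) (out : String) : Prop := out = summarize_elements_alt grid
instance (grid : List (List String)) (out : String) : Decidable (Spec_summarize_elements grid out) := by unfold Spec_summarize_elements; infer_instance

-- ===== CLAIM (what is proved, stated in full; the proofs are below) =====
def Claim_equal_summarize_elements : Prop := ∀ (grid : List (List String)), Dom_summarize_elements grid → Spec_summarize_elements grid (summarize_elements grid)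

-- ===== LEMMAS AND PROOFS =====

def rowFilt (pred : String → Bool) (r : Int) (l : List (Int × String)) : List (Int × Int) :=
  l.filterMap (fun cch => if pred cch.2 then some (r, cch.1) else none)

lemma stepA_inner (r : Int) (l : List (Int × String)) (pl bx tg bt : List (Int × Int)) :
    l.foldl (stepA r) (pl, bx, tg, bt) =
      (pl ++ rowFilt (fun ch => ch == "@" || ch == "+") r l,
       bx ++ rowFilt (fun ch => ch == "$") r l,
       tg ++ rowFilt (fun ch => ch == "+" || ch == "?") r l,
       bt ++ rowFilt (fun ch => ch == "*") r l) := by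
  induction l generalizing pl bx tg bt with
  | nil => simp [rowFilt]
  | cons x xs ih =>
    obtain ⟨c, ch⟩ := x
    simp only [List.foldl_cons, stepA]
    by_cases h1 : ch = "@"
    · simp [h1, ih, rowFilt]
    · by_cases h2 : ch = "+"
      · simp [h2, ih, rowFilt]
      · by_cases h3 : ch = "$"
        · simp [h3, ih, rowFilt]
        · by_cases h4 : ch = "?"
          · simp [h4, ih, rowFilt]
          · by_cases h5 : ch = "*"
            · simp [h5, ih, rowFilt]
            · simp [h1, h2, h3, h4, h5, ih, rowFilt]

lemma foldA_eq (g : List (Int × List String)) (pl bx tg bt : List (Int × Int)) :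
    g.foldl rowA (pl, bx, tg, bt) =
      (pl ++ g.flatMap (fun rrow => rowFilt (fun ch => ch == "@" || ch == "+") rrow.1 (PySem.List.enumerate rrow.2)),
       bx ++ g.flatMap (fun rrow => rowFilt (fun ch => ch == "$") rrow.1 (PySem.List.enumerate rrow.2)),
       tg ++ g.flatMap (fun rrow => rowFilt (fun ch => ch == "+" || ch == "?") rrow.1 (PySem.List.enumerate rrow.2)),
       bt ++ g.flatMap (fun rrow => rowFilt (fun ch => ch == "*") rrow.1 (PySem.List.enumerate rrow.2))) := by
  induction g generalizing pl bx tg bt with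
  | nil => simp
  | cons x xs ih =>
    obtain ⟨r, row⟩ := x
    simp only [List.foldl_cons, rowA, stepA_inner, ih, List.flatMap_cons, List.append_assoc]

lemma collectB_eq (pred : String → Bool) (grid : List (List String)) :
    collectB pred grid =
      (PySem.List.enumerate grid).flatMap
        (fun rrow => rowFilt pred rrow.1 (PySem.List.enumerate rrow.2)) := by
  simp [collectB, rowFilt]

-- ===== VERDICT (by name: the statement is the Claim_ definition above) =====
theorem summarize_elements_spec : Claim_equal_summarize_elements := by
  intro grid _
  unfold Spec_summarize_elements summarize_elements summarize_elements_alt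
  simp only [foldA_eq, collectB_eq, List.nil_append]
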